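-- pv_equiv track=rewrite | github.com/pypi-data/pypi-mirror-401 | packages/genro-toolbox/genro_toolbox-0.6.1.tar.gz/genro_toolbox-0.6.1/src/genro_toolbox/ascii_table.py | normalize_date_format
-- ===== SOURCE A (Python) =====
-- def normalize_date_format(fmt: str) -> str:
--     mapping = {
--         "yyyy": "%Y",
--         "yy": "%y",
--         "mm": "%m",
--         "dd": "%d",
--         "HH": "%H",
--         "MM": "%M",
--         "SS": "%S",
--     }
--     out = fmt
--     for k, v in mapping.items():
--         out = out.replace(k, v)
--     return out
-- ===== SOURCE B (Python) =====
-- def normalize_date_format(fmt: str) -> str: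
--     out = []
--     i = 0
--     n = len(fmt)
--     while i < n:
--         if fmt.startswith("yyyy", i):
--             out.append("%Y"); i += 4
--         elif fmt.startswith("yy", i):
--             out.append("%y"); i += 2
--         elif fmt.startswith("mm", i):
--             out.append("%m"); i += 2
--         elif fmt.startswith("dd", i):
--             out.append("%d"); i += 2
--         elif fmt.startswith("HH", i):
--             out.append("%H"); i += 2
--         elif fmt.startswith("MM", i):
--             out.append("%M"); i += 2
--         elif fmt.startswith("SS", i):
--             out.append("%S"); i += 2
--         else:
--             out.append(fmt[i]); i += 1
--     return "".join(out)
-- ===== Notes on version B (the rewrite author's own statement) =====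
-- stated objective: alternative
-- what changed: Replaces seven sequential full-string str.replace passes by a single left-to-right scan that tries the tokens longest-first at each position and emits the strftime code or the character; single pass instead of seven, though CPython's C-level replace makes A faster in wall-clock terms.
import Mathlib
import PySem

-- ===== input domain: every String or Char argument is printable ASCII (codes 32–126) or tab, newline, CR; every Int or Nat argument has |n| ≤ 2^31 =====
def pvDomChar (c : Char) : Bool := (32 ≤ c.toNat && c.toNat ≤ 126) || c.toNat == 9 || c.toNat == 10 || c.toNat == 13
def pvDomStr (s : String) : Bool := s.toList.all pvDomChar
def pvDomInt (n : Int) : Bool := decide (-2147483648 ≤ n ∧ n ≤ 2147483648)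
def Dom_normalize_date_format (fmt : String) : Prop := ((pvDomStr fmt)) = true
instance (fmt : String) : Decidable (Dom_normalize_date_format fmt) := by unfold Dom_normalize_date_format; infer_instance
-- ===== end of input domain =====

-- B replaces A's seven full `str.replace` passes by ONE left-to-right scan trying the tokens
-- longest-first at each position (objective: alternative single-pass algorithm).

-- ===== PORT A =====
def normalize_date_format (fmt : String) : String :=
  let mapping : PySem.Dict String String :=
    PySem.Dict.ofList [("yyyy", "%Y"), ("yy", "%y"), ("mm", "%m"), ("dd", "%d"),
                       ("HH", "%H"), ("MM", "%M"), ("SS", "%S")]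
  mapping.items.foldl (fun out kv => PySem.Str.replace out kv.1 kv.2) fmt

-- ===== PORT B =====
-- the while loop of Source B, consuming the characters left to right; each branch is one
-- `fmt.startswith(tok, i)` test in Source B's order, advancing by the token's length.
def pvScan (l : List Char) : List Char :=
  match l with
  | [] => []
  | c :: t =>
    if ['y','y','y','y'].isPrefixOf (c :: t) then ['%','Y'] ++ pvScan (t.drop 3)
    else if ['y','y'].isPrefixOf (c :: t) then ['%','y'] ++ pvScan (t.drop 1)
    else if ['m','m'].isPrefixOf (c :: t) then ['%','m'] ++ pvScan (t.drop 1)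
    else if ['d','d'].isPrefixOf (c :: t) then ['%','d'] ++ pvScan (t.drop 1)
    else if ['H','H'].isPrefixOf (c :: t) then ['%','H'] ++ pvScan (t.drop 1)
    else if ['M','M'].isPrefixOf (c :: t) then ['%','M'] ++ pvScan (t.drop 1)
    else if ['S','S'].isPrefixOf (c :: t) then ['%','S'] ++ pvScan (t.drop 1)
    else c :: pvScan t
termination_by l.length
decreasing_by all_goals simp [List.length_drop]

def normalize_date_format_alt (fmt : String) : String :=
  String.ofList (pvScan fmt.toList)

-- ===== PRECONDITION & SPEC =====
def Spec_normalize_date_format (fmt : String) (out : String) : Prop := out = normalize_date_format_alt fmt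
instance (fmt : String) (out : String) : Decidable (Spec_normalize_date_format fmt out) := by unfold Spec_normalize_date_format; infer_instance

-- ===== CLAIM (what is proved, stated in full; the proofs are below) =====
def Claim_equal_normalize_date_format : Prop := ∀ (fmt : String), Dom_normalize_date_format fmt → Spec_normalize_date_format fmt (normalize_date_format fmt)

-- ===== LEMMAS AND PROOFS =====

-- executable model of Python's s.replace(old, new) for nonempty old
def pvRepl (old new : List Char) (l : List Char) : List Char :=
  match l with
  | [] => []
  | c :: t =>
    if old.isPrefixOf (c :: t) then new ++ pvRepl old new (t.drop (old.length - 1))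
    else c :: pvRepl old new t
termination_by l.length
decreasing_by all_goals simp [List.length_drop]

theorem pvGo_eq (fuel : Nat) : ∀ (old new l acc : List Char), old ≠ [] → l.length ≤ fuel →
    PySem.Chars.replace.go old new fuel l acc = acc.reverse ++ pvRepl old new l := by
  induction fuel with
  | zero =>
    intro old new l acc _ hl
    have : l = [] := List.eq_nil_of_length_eq_zero (Nat.le_zero.mp hl)
    subst this
    rw [PySem.Chars.replace.go.eq_def]
    simp [pvRepl]
  | succ fuel ih =>
    intro old new l acc hold hl
    rw [PySem.Chars.replace.go.eq_def]
    cases l with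
    | nil => simp [pvRepl]
    | cons c t =>
      obtain ⟨oh, ot, rfl⟩ : ∃ oh ot, old = oh :: ot := by
        cases old with
        | nil => exact absurd rfl hold
        | cons a b => exact ⟨a, b, rfl⟩
      by_cases hpre : (oh :: ot).isPrefixOf (c :: t) = true
      · simp only [hpre, if_pos]
        rw [ih _ _ _ _ hold (by simp at hl ⊢; omega)]
        rw [pvRepl, if_pos hpre]
        simp [List.drop_succ_cons]
      · have hf : (oh :: ot).isPrefixOf (c :: t) = false := Bool.eq_false_iff.mpr hpre
        simp only [hf, Bool.false_eq_true, if_false]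
        rw [ih _ _ _ _ hold (by simp at hl ⊢; omega)]
        rw [pvRepl, if_neg hpre]
        simp

theorem replace_eq_pvRepl (s old new : List Char) (h : old ≠ []) :
    PySem.Chars.replace s old new = pvRepl old new s := by
  unfold PySem.Chars.replace
  rw [if_neg (by simp [List.isEmpty_iff, h]), pvGo_eq s.length old new s [] h le_rfl]
  simp

-- leftmost match: replacing at a present prefix
theorem pvRepl_prefix (oh : Char) (ot new r : List Char) :
    pvRepl (oh :: ot) new ((oh :: ot) ++ r) = new ++ pvRepl (oh :: ot) new r := by
  rw [List.cons_append, pvRepl,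
     if_pos (List.isPrefixOf_iff_prefix.mpr (by rw [← List.cons_append]; exact List.prefix_append _ _))]
  congr 1
  simp

theorem pvRepl_cons_of_not_prefix (old new : List Char) (c : Char) (t : List Char)
    (h : ¬ old <+: (c :: t)) : pvRepl old new (c :: t) = c :: pvRepl old new t := by
  rw [pvRepl, if_neg (by simp [List.isPrefixOf_iff_prefix, h])]

-- a prefix none of whose characters can start a match passes through untouched
theorem pvRepl_pass (oh : Char) (ot new : List Char) :
    ∀ (p X : List Char), (∀ c ∈ p, c ≠ oh) →
    pvRepl (oh :: ot) new (p ++ X) = p ++ pvRepl (oh :: ot) new X := by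
  intro p
  induction p with
  | nil => intro X _; rfl
  | cons c p ih =>
    intro X hp
    rw [List.cons_append, pvRepl_cons_of_not_prefix _ _ _ _
      (by intro hpre; exact hp c (by simp) (List.cons_prefix_cons.mp hpre).1.symm)]
    rw [ih X (fun d hd => hp d (by simp [hd]))]
    simp

-- the head of a replace result is '%' or the original head
theorem pvRepl_head (oh : Char) (ot u X : List Char) :
    (pvRepl (oh :: ot) ('%' :: u) X).head? = some '%' ∨
    (pvRepl (oh :: ot) ('%' :: u) X).head? = X.head? := by
  cases X with
  | nil => right; simp [pvRepl]
  | cons c t =>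
    rw [pvRepl]
    split
    · left; rfl
    · right; rfl

theorem pvRepl_head_ne (oh : Char) (ot u X : List Char) (c : Char) (hc : c ≠ '%')
    (h : X.head? ≠ some c) : (pvRepl (oh :: ot) ('%' :: u) X).head? ≠ some c := by
  rcases pvRepl_head oh ot u X with h' | h' <;> rw [h']
  · simp [Ne.symm hc]
  · exact h

theorem prefix2_iff (a b c : Char) (X : List Char) :
    [a, b] <+: (c :: X) ↔ (a = c ∧ X.head? = some b) := by
  cases X with
  | nil => simp [List.cons_prefix_cons]
  | cons d t => simp [List.cons_prefix_cons, eq_comm]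

-- the composition of A's seven replace passes
def pvChain (X : List Char) : List Char :=
  pvRepl ['S','S'] ['%','S'] (pvRepl ['M','M'] ['%','M'] (pvRepl ['H','H'] ['%','H']
    (pvRepl ['d','d'] ['%','d'] (pvRepl ['m','m'] ['%','m'] (pvRepl ['y','y'] ['%','y']
      (pvRepl ['y','y','y','y'] ['%','Y'] X))))))

theorem chain_yyyy (r : List Char) :
    pvChain (['y','y','y','y'] ++ r) = ['%','Y'] ++ pvChain r := by
  unfold pvChain
  rw [pvRepl_prefix]
  rw [pvRepl_pass 'y' _ _ ['%','Y'] _ (by simp), pvRepl_pass 'm' _ _ ['%','Y'] _ (by simp),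
      pvRepl_pass 'd' _ _ ['%','Y'] _ (by simp), pvRepl_pass 'H' _ _ ['%','Y'] _ (by simp),
      pvRepl_pass 'M' _ _ ['%','Y'] _ (by simp), pvRepl_pass 'S' _ _ ['%','Y'] _ (by simp)]

theorem chain_yy (r : List Char) (h : ¬ ['y','y'] <+: r) :
    pvChain (['y','y'] ++ r) = ['%','y'] ++ pvChain r := by
  unfold pvChain
  have h4a : ¬ (['y','y','y','y'] : List Char) <+: ('y' :: 'y' :: r) := by
    simp only [List.cons_prefix_cons]
    rintro ⟨-, -, hp⟩
    exact h hp
  have h4b : ¬ (['y','y','y','y'] : List Char) <+: ('y' :: r) := by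
    simp only [List.cons_prefix_cons]
    rintro ⟨-, hp⟩
    exact h ((by simp : (['y','y'] : List Char) <+: ['y','y','y']).trans hp)
  rw [show (['y','y'] ++ r : List Char) = 'y' :: 'y' :: r from rfl,
      pvRepl_cons_of_not_prefix _ _ _ _ h4a, pvRepl_cons_of_not_prefix _ _ _ _ h4b,
      show ('y' :: 'y' :: pvRepl ['y','y','y','y'] ['%','Y'] r : List Char)
        = ['y','y'] ++ pvRepl ['y','y','y','y'] ['%','Y'] r from rfl,
      pvRepl_prefix]
  rw [pvRepl_pass 'm' _ _ ['%','y'] _ (by simp), pvRepl_pass 'd' _ _ ['%','y'] _ (by simp),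
      pvRepl_pass 'H' _ _ ['%','y'] _ (by simp), pvRepl_pass 'M' _ _ ['%','y'] _ (by simp),
      pvRepl_pass 'S' _ _ ['%','y'] _ (by simp)]

theorem chain_mm (r : List Char) :
    pvChain (['m','m'] ++ r) = ['%','m'] ++ pvChain r := by
  unfold pvChain
  rw [pvRepl_pass 'y' _ _ ['m','m'] _ (by simp), pvRepl_pass 'y' _ _ ['m','m'] _ (by simp),
      pvRepl_prefix,
      pvRepl_pass 'd' _ _ ['%','m'] _ (by simp), pvRepl_pass 'H' _ _ ['%','m'] _ (by simp),
      pvRepl_pass 'M' _ _ ['%','m'] _ (by simp), pvRepl_pass 'S' _ _ ['%','m'] _ (by simp)]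

theorem chain_dd (r : List Char) :
    pvChain (['d','d'] ++ r) = ['%','d'] ++ pvChain r := by
  unfold pvChain
  rw [pvRepl_pass 'y' _ _ ['d','d'] _ (by simp), pvRepl_pass 'y' _ _ ['d','d'] _ (by simp),
      pvRepl_pass 'm' _ _ ['d','d'] _ (by simp), pvRepl_prefix,
      pvRepl_pass 'H' _ _ ['%','d'] _ (by simp),
      pvRepl_pass 'M' _ _ ['%','d'] _ (by simp), pvRepl_pass 'S' _ _ ['%','d'] _ (by simp)]

theorem chain_HH (r : List Char) :
    pvChain (['H','H'] ++ r) = ['%','H'] ++ pvChain r := by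
  unfold pvChain
  rw [pvRepl_pass 'y' _ _ ['H','H'] _ (by simp), pvRepl_pass 'y' _ _ ['H','H'] _ (by simp),
      pvRepl_pass 'm' _ _ ['H','H'] _ (by simp), pvRepl_pass 'd' _ _ ['H','H'] _ (by simp),
      pvRepl_prefix,
      pvRepl_pass 'M' _ _ ['%','H'] _ (by simp), pvRepl_pass 'S' _ _ ['%','H'] _ (by simp)]

theorem chain_MM (r : List Char) :
    pvChain (['M','M'] ++ r) = ['%','M'] ++ pvChain r := by
  unfold pvChain
  rw [pvRepl_pass 'y' _ _ ['M','M'] _ (by simp), pvRepl_pass 'y' _ _ ['M','M'] _ (by simp),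
      pvRepl_pass 'm' _ _ ['M','M'] _ (by simp), pvRepl_pass 'd' _ _ ['M','M'] _ (by simp),
      pvRepl_pass 'H' _ _ ['M','M'] _ (by simp), pvRepl_prefix,
      pvRepl_pass 'S' _ _ ['%','M'] _ (by simp)]

theorem chain_SS (r : List Char) :
    pvChain (['S','S'] ++ r) = ['%','S'] ++ pvChain r := by
  unfold pvChain
  rw [pvRepl_pass 'y' _ _ ['S','S'] _ (by simp), pvRepl_pass 'y' _ _ ['S','S'] _ (by simp),
      pvRepl_pass 'm' _ _ ['S','S'] _ (by simp), pvRepl_pass 'd' _ _ ['S','S'] _ (by simp),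
      pvRepl_pass 'H' _ _ ['S','S'] _ (by simp), pvRepl_pass 'M' _ _ ['S','S'] _ (by simp),
      pvRepl_prefix]

theorem chain_default (c : Char) (r : List Char)
    (hy : ¬ ['y','y'] <+: (c :: r)) (hm : ¬ ['m','m'] <+: (c :: r))
    (hd : ¬ ['d','d'] <+: (c :: r)) (hH : ¬ ['H','H'] <+: (c :: r))
    (hM : ¬ ['M','M'] <+: (c :: r)) (hS : ¬ ['S','S'] <+: (c :: r)) :
    pvChain (c :: r) = c :: pvChain r := by
  unfold pvChain
  rw [pvRepl_cons_of_not_prefix _ _ _ _ (fun hp => hy ((by simp : (['y','y'] : List Char) <+: ['y','y','y','y']).trans hp))]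
  rw [pvRepl_cons_of_not_prefix _ _ _ _ (by
    rw [prefix2_iff]; rintro ⟨rfl, hh⟩
    exact pvRepl_head_ne _ _ _ _ _ (by simp)
      (fun h => hy ((prefix2_iff _ _ _ _).mpr ⟨rfl, h⟩)) hh)]
  rw [pvRepl_cons_of_not_prefix _ _ _ _ (by
    rw [prefix2_iff]; rintro ⟨rfl, hh⟩
    exact pvRepl_head_ne _ _ _ _ _ (by simp) (pvRepl_head_ne _ _ _ _ _ (by simp)
      (fun h => hm ((prefix2_iff _ _ _ _).mpr ⟨rfl, h⟩))) hh)]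
  rw [pvRepl_cons_of_not_prefix _ _ _ _ (by
    rw [prefix2_iff]; rintro ⟨rfl, hh⟩
    exact pvRepl_head_ne _ _ _ _ _ (by simp) (pvRepl_head_ne _ _ _ _ _ (by simp)
      (pvRepl_head_ne _ _ _ _ _ (by simp)
        (fun h => hd ((prefix2_iff _ _ _ _).mpr ⟨rfl, h⟩)))) hh)]
  rw [pvRepl_cons_of_not_prefix _ _ _ _ (by
    rw [prefix2_iff]; rintro ⟨rfl, hh⟩
    exact pvRepl_head_ne _ _ _ _ _ (by simp) (pvRepl_head_ne _ _ _ _ _ (by simp)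
      (pvRepl_head_ne _ _ _ _ _ (by simp) (pvRepl_head_ne _ _ _ _ _ (by simp)
        (fun h => hH ((prefix2_iff _ _ _ _).mpr ⟨rfl, h⟩))))) hh)]
  rw [pvRepl_cons_of_not_prefix _ _ _ _ (by
    rw [prefix2_iff]; rintro ⟨rfl, hh⟩
    exact pvRepl_head_ne _ _ _ _ _ (by simp) (pvRepl_head_ne _ _ _ _ _ (by simp)
      (pvRepl_head_ne _ _ _ _ _ (by simp) (pvRepl_head_ne _ _ _ _ _ (by simp)
        (pvRepl_head_ne _ _ _ _ _ (by simp)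
          (fun h => hM ((prefix2_iff _ _ _ _).mpr ⟨rfl, h⟩)))))) hh)]
  rw [pvRepl_cons_of_not_prefix _ _ _ _ (by
    rw [prefix2_iff]; rintro ⟨rfl, hh⟩
    exact pvRepl_head_ne _ _ _ _ _ (by simp) (pvRepl_head_ne _ _ _ _ _ (by simp)
      (pvRepl_head_ne _ _ _ _ _ (by simp) (pvRepl_head_ne _ _ _ _ _ (by simp)
        (pvRepl_head_ne _ _ _ _ _ (by simp) (pvRepl_head_ne _ _ _ _ _ (by simp)
          (fun h => hS ((prefix2_iff _ _ _ _).mpr ⟨rfl, h⟩))))))) hh)]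

theorem not_prefix_of_isPrefixOf_false (tok : List Char) (l : List Char)
    (h : tok.isPrefixOf l = false) : ¬ tok <+: l := by
  rw [← List.isPrefixOf_iff_prefix, h]
  simp

theorem chain_eq_scan (l : List Char) : pvChain l = pvScan l := by
  induction l using pvScan.induct with
  | case1 => simp [pvChain, pvRepl, pvScan]
  | case2 c t h ih =>
    obtain ⟨r, hr⟩ := List.isPrefixOf_iff_prefix.mp h
    simp only [List.cons_append, List.nil_append] at hr
    injection hr with hc ht
    subst hc; subst ht
    simp only [List.drop_succ_cons, List.drop_zero] at ih ⊢
    rw [pvScan, if_pos h]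
    simp only [List.drop_succ_cons, List.drop_zero]
    rw [show ('y' :: 'y' :: 'y' :: 'y' :: r : List Char) = ['y','y','y','y'] ++ r from rfl,
        chain_yyyy, ih]
  | case3 c t h1 h2 ih =>
    obtain ⟨r, hr⟩ := List.isPrefixOf_iff_prefix.mp h2
    simp only [List.cons_append, List.nil_append] at hr
    injection hr with hc ht
    subst hc; subst ht
    simp only [List.drop_succ_cons, List.drop_zero] at ih ⊢
    rw [pvScan, if_neg (by simp [h1]), if_pos h2]
    simp only [List.drop_succ_cons, List.drop_zero]
    have hr' : ¬ (['y','y'] : List Char) <+: r := by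
      intro hp
      apply not_prefix_of_isPrefixOf_false _ _ (Bool.eq_false_iff.mpr h1)
      simp only [List.cons_prefix_cons]
      exact ⟨trivial, trivial, hp⟩
    rw [show ('y' :: 'y' :: r : List Char) = ['y','y'] ++ r from rfl, chain_yy r hr', ih]
  | case4 c t h1 h2 h3 ih =>
    obtain ⟨r, hr⟩ := List.isPrefixOf_iff_prefix.mp h3
    simp only [List.cons_append, List.nil_append] at hr
    injection hr with hc ht
    subst hc; subst ht
    simp only [List.drop_succ_cons, List.drop_zero] at ih ⊢
    rw [pvScan, if_neg (by simp [h1]), if_neg (by simp [h2]), if_pos h3]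
    simp only [List.drop_succ_cons, List.drop_zero]
    rw [show ('m' :: 'm' :: r : List Char) = ['m','m'] ++ r from rfl, chain_mm, ih]
  | case5 c t h1 h2 h3 h4 ih =>
    obtain ⟨r, hr⟩ := List.isPrefixOf_iff_prefix.mp h4
    simp only [List.cons_append, List.nil_append] at hr
    injection hr with hc ht
    subst hc; subst ht
    simp only [List.drop_succ_cons, List.drop_zero] at ih ⊢
    rw [pvScan, if_neg (by simp [h1]), if_neg (by simp [h2]), if_neg (by simp [h3]), if_pos h4]
    simp only [List.drop_succ_cons, List.drop_zero]
    rw [show ('d' :: 'd' :: r : List Char) = ['d','d'] ++ r from rfl, chain_dd, ih]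
  | case6 c t h1 h2 h3 h4 h5 ih =>
    obtain ⟨r, hr⟩ := List.isPrefixOf_iff_prefix.mp h5
    simp only [List.cons_append, List.nil_append] at hr
    injection hr with hc ht
    subst hc; subst ht
    simp only [List.drop_succ_cons, List.drop_zero] at ih ⊢
    rw [pvScan, if_neg (by simp [h1]), if_neg (by simp [h2]), if_neg (by simp [h3]),
        if_neg (by simp [h4]), if_pos h5]
    simp only [List.drop_succ_cons, List.drop_zero]
    rw [show ('H' :: 'H' :: r : List Char) = ['H','H'] ++ r from rfl, chain_HH, ih]
  | case7 c t h1 h2 h3 h4 h5 h6 ih =>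
    obtain ⟨r, hr⟩ := List.isPrefixOf_iff_prefix.mp h6
    simp only [List.cons_append, List.nil_append] at hr
    injection hr with hc ht
    subst hc; subst ht
    simp only [List.drop_succ_cons, List.drop_zero] at ih ⊢
    rw [pvScan, if_neg (by simp [h1]), if_neg (by simp [h2]), if_neg (by simp [h3]),
        if_neg (by simp [h4]), if_neg (by simp [h5]), if_pos h6]
    simp only [List.drop_succ_cons, List.drop_zero]
    rw [show ('M' :: 'M' :: r : List Char) = ['M','M'] ++ r from rfl, chain_MM, ih]
  | case8 c t h1 h2 h3 h4 h5 h6 h7 ih =>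
    obtain ⟨r, hr⟩ := List.isPrefixOf_iff_prefix.mp h7
    simp only [List.cons_append, List.nil_append] at hr
    injection hr with hc ht
    subst hc; subst ht
    simp only [List.drop_succ_cons, List.drop_zero] at ih ⊢
    rw [pvScan, if_neg (by simp [h1]), if_neg (by simp [h2]), if_neg (by simp [h3]),
        if_neg (by simp [h4]), if_neg (by simp [h5]), if_neg (by simp [h6]), if_pos h7]
    simp only [List.drop_succ_cons, List.drop_zero]
    rw [show ('S' :: 'S' :: r : List Char) = ['S','S'] ++ r from rfl, chain_SS, ih]
  | case9 c t h1 h2 h3 h4 h5 h6 h7 ih =>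
    rw [pvScan, if_neg (by simp [h1]), if_neg (by simp [h2]), if_neg (by simp [h3]),
        if_neg (by simp [h4]), if_neg (by simp [h5]), if_neg (by simp [h6]),
        if_neg (by simp [h7]), ← ih]
    exact chain_default c t
      (not_prefix_of_isPrefixOf_false _ _ (Bool.eq_false_iff.mpr h2))
      (not_prefix_of_isPrefixOf_false _ _ (Bool.eq_false_iff.mpr h3))
      (not_prefix_of_isPrefixOf_false _ _ (Bool.eq_false_iff.mpr h4))
      (not_prefix_of_isPrefixOf_false _ _ (Bool.eq_false_iff.mpr h5))
      (not_prefix_of_isPrefixOf_false _ _ (Bool.eq_false_iff.mpr h6))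
      (not_prefix_of_isPrefixOf_false _ _ (Bool.eq_false_iff.mpr h7))

theorem A_eq_chain (fmt : String) : normalize_date_format fmt = String.ofList (pvChain fmt.toList) := by
  rw [show normalize_date_format fmt
      = List.foldl (fun out kv => PySem.Str.replace out kv.1 kv.2) fmt
          [("yyyy", "%Y"), ("yy", "%y"), ("mm", "%m"), ("dd", "%d"),
           ("HH", "%H"), ("MM", "%M"), ("SS", "%S")] from rfl]
  simp only [List.foldl, PySem.Str.replace, String.toList_ofList]
  rw [replace_eq_pvRepl _ _ _ (by simp), replace_eq_pvRepl _ _ _ (by simp),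
      replace_eq_pvRepl _ _ _ (by simp), replace_eq_pvRepl _ _ _ (by simp),
      replace_eq_pvRepl _ _ _ (by simp), replace_eq_pvRepl _ _ _ (by simp),
      replace_eq_pvRepl _ _ _ (by simp)]
  rfl

-- ===== VERDICT (by name: the statement is the Claim_ definition above) =====
theorem normalize_date_format_spec : Claim_equal_normalize_date_format := by
  intro fmt _
  unfold Spec_normalize_date_format normalize_date_format_alt
  rw [A_eq_chain, chain_eq_scan]
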